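-- pv_equiv track=rewrite | github.com/dcalleg707/Curso-Datos-1 | talleres/taller02/cadena.py | cadena
-- ===== SOURCE A (Python) =====
-- def cadena(x,y):
--     for i in x:
--         if len(y) == 0 :
--             return ""
--         elif i == y[len(y)-1]:
--             return i + " " + cadena(x, y[:len(y) - 1])
--             continue
--         else:
--             cadena(x, y[:len(y) - 1])
-- ===== SOURCE B (Python) =====
-- def cadena(x, y):
--     # Iterative re-implementation: None for empty x or when some char of y is
--     # missing from x (where A either returns None or raises); otherwise the
--     # chars of y reversed, each followed by a space.
--     if x == "":
--         return None
--     if any(c not in x for c in y):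
--         return None
--     return "".join(c + " " for c in reversed(y))
-- ===== Notes on version B (the rewrite author's own statement) =====
-- stated objective: simpler
-- what changed: Replaced A's recursion on y[:-1] with an exponential tree of discarded recursive calls inside a linear scan of x by a single membership check over y plus one join over reversed(y); B returns None where A raises TypeError.
-- crash fix: When y is nonempty, y's last char is in x, but some other char of y is not in x, A raises TypeError (str + None); B returns None there. — e.g. on cadena("b", "ab"): A raises TypeError, B returns none
import Mathlib
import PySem

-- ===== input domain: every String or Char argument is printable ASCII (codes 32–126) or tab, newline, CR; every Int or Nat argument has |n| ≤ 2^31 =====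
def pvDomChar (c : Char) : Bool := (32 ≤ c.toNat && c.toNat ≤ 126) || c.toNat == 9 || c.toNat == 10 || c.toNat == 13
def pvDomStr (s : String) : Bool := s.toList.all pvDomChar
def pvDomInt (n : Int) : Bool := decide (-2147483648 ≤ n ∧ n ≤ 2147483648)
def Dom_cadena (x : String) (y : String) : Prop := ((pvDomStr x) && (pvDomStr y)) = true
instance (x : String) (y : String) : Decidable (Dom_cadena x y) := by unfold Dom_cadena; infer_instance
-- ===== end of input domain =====

-- B replaces A's recursion on y[:-1] (with an exponential tree of discarded recursive
-- calls inside a scan of x) by one membership check over y and a single join; on inputs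
-- where A raises TypeError (excluded by Pre_) B returns None.

-- ===== PORT A =====
-- Strings are handled as List Char (PySem convention); the wrapper applies String.ofList.
-- State: x = the full first argument, xs = the rest of the for-loop over x, ys = y.
-- In Python's final 'else' branch cadena(x, y[:-1]) is evaluated and its result
-- discarded; the call is pure and, on every input admitted by Pre_cadena, it returns
-- normally, so the discarded call is omitted here (exact on Pre_cadena).
def cadenaGo (x xs ys : List Char) : Option (List Char) :=
  match xs with
  | [] => none                                    -- for-loop exhausted: fall off, return None
  | i :: rest =>
    if ys.length = 0 then some []                 -- if len(y) == 0: return ""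
    else if i = ys.getLast?.getD ' ' then         -- elif i == y[len(y)-1]  (ys ≠ [], so getLast? is some)
      -- return i + " " + cadena(x, y[:len(y)-1]); if the recursive call returned None,
      -- Python would raise TypeError — excluded by Pre_cadena (none here)
      (cadenaGo x x ys.dropLast).map (fun s => i :: ' ' :: s)
    else
      cadenaGo x rest ys                          -- continue the for-loop
termination_by (ys.length, xs.length)
decreasing_by
  · simp only [List.length_dropLast]
    exact Prod.Lex.left _ _ (by omega)
  · exact Prod.Lex.right _ (by simp)

def cadena (x : String) (y : String) : Option String :=
  (cadenaGo x.toList x.toList y.toList).map String.ofList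

-- ===== PORT B =====
-- Source B: guard on empty x, one any-pass over y ('c not in x' on a single char is
-- membership in x's characters, exact), then "".join(c + " " for c in reversed(y)).
def cadena_alt (x : String) (y : String) : Option String :=
  if x = "" then none
  else if y.toList.any (fun c => !(x.toList.contains c)) then none
  else some (String.ofList (PySem.Chars.join [] (y.toList.reverse.map (fun c => [c, ' ']))))

-- ===== PRECONDITION & SPEC =====
-- Pre_ excludes exactly the inputs on which A raises TypeError: x nonempty and some
-- char of y that is absent from x immediately followed by a char of y present in x
-- (then the recursion concatenates a str with None).
def Pre_cadena (x : String) (y : String) : Prop :=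
  x = "" ∨ List.IsChain (fun a b => b ∈ x.toList → a ∈ x.toList) y.toList
instance (x : String) (y : String) : Decidable (Pre_cadena x y) := by
  unfold Pre_cadena; infer_instance
def pvWitness_cadena : String × String := ("ab", "ba")

-- When x is nonempty and some char of y absent from x is immediately followed by a
-- char of y present in x, A raises TypeError (str + None); B returns None there.
def Raises_cadena (x : String) (y : String) : Prop :=
  x ≠ "" ∧ ¬ List.IsChain (fun a b => b ∈ x.toList → a ∈ x.toList) y.toList
instance (x : String) (y : String) : Decidable (Raises_cadena x y) := by
  unfold Raises_cadena; infer_instance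
def pvRaiseWitness_cadena : String × String := ("b", "ab")
def pvRaiseWitnessOut_cadena : Option String := none

def Spec_cadena (x : String) (y : String) (out : Option String) : Prop := out = cadena_alt x y
instance (x : String) (y : String) (out : Option String) : Decidable (Spec_cadena x y out) := by unfold Spec_cadena; infer_instance

-- ===== CLAIM (what is proved, stated in full; the proofs are below) =====
def Claim_equal_cadena : Prop := ∀ (x : String) (y : String), Dom_cadena x y → Pre_cadena x y → Spec_cadena x y (cadena x y)
def Claim_raises_cadena : Prop := (∀ (x : String) (y : String), Dom_cadena x y → Raises_cadena x y → ¬ Pre_cadena x y) ∧ (Dom_cadena (pvRaiseWitness_cadena.1) (pvRaiseWitness_cadena.2) ∧ Raises_cadena (pvRaiseWitness_cadena.1) (pvRaiseWitness_cadena.2) ∧ cadena_alt (pvRaiseWitness_cadena.1) (pvRaiseWitness_cadena.2) = pvRaiseWitnessOut_cadena)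

-- ===== LEMMAS AND PROOFS =====
-- The for-loop over x finds no char equal to y's last char: falls off, returns None.
theorem cadenaGo_not_mem (x : List Char) (ys : List Char) (l : Char)
    (hl : ys.getLast? = some l) :
    ∀ xs : List Char, l ∉ xs → cadenaGo x xs ys = none := by
  intro xs
  induction xs with
  | nil => intro _; rw [cadenaGo]
  | cons i rest ih =>
    intro hmem
    have hne : ys ≠ [] := by intro h; simp [h] at hl
    have hlen : ¬ ys.length = 0 := by simpa using hne
    have hil : i ≠ l := by intro h; exact hmem (h ▸ List.mem_cons_self)
    rw [cadenaGo]
    simp only [hlen, if_false, hl, Option.getD_some]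
    rw [if_neg hil]
    exact ih (fun h => hmem (List.mem_cons_of_mem _ h))

-- The for-loop over x reaches a char equal to y's last char: returns the concatenation.
theorem cadenaGo_mem (x : List Char) (ys : List Char) (l : Char)
    (hl : ys.getLast? = some l) :
    ∀ xs : List Char, l ∈ xs →
      cadenaGo x xs ys = (cadenaGo x x ys.dropLast).map (fun s => l :: ' ' :: s) := by
  intro xs
  induction xs with
  | nil => intro h; cases h
  | cons i rest ih =>
    intro hmem
    have hne : ys ≠ [] := by intro h; simp [h] at hl
    have hlen : ¬ ys.length = 0 := by simpa using hne
    rw [cadenaGo]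
    simp only [hlen, if_false, hl, Option.getD_some]
    by_cases hil : i = l
    · subst hil; simp
    · rw [if_neg hil]
      exact ih (by cases hmem with
        | head => exact absurd rfl hil
        | tail _ h => exact h)

theorem join_nil_cons (p : List Char) (ps : List (List Char)) :
    PySem.Chars.join [] (p :: ps) = p ++ PySem.Chars.join [] ps := by
  cases ps with
  | nil => simp [PySem.Chars.join_singleton, PySem.Chars.join_nil]
  | cons q rest => simp [PySem.Chars.join_cons_cons]

-- All chars of y occur in x: A returns the reversed, space-separated string.
theorem cadenaGo_all_mem (x : List Char) (hx : x ≠ []) :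
    ∀ ys : List Char, (∀ c ∈ ys, c ∈ x) →
      cadenaGo x x ys = some (PySem.Chars.join [] (ys.reverse.map (fun c => [c, ' ']))) := by
  intro ys
  induction ys using List.reverseRecOn with
  | nil =>
    intro _
    cases x with
    | nil => exact absurd rfl hx
    | cons i rest => rw [cadenaGo]; simp [PySem.Chars.join_nil]
  | append_singleton ys l ih =>
    intro hall
    have hlast : (ys ++ [l]).getLast? = some l := List.getLast?_concat
    have hlx : l ∈ x := hall l (by simp)
    rw [cadenaGo_mem x (ys ++ [l]) l hlast x hlx, List.dropLast_concat,
      ih (fun c hc => hall c (List.mem_append_left _ hc))]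
    simp [join_nil_cons]

-- Chain' propagates membership backwards from the last element.
theorem isChain_all_mem (x : List Char) :
    ∀ ys : List Char, List.IsChain (fun a b => b ∈ x → a ∈ x) ys →
      ∀ l, ys.getLast? = some l → l ∈ x → ∀ c ∈ ys, c ∈ x := by
  intro ys
  induction ys with
  | nil => intro _ l hl; simp at hl
  | cons a t ih =>
    intro hch l hl hlx c hc
    cases t with
    | nil =>
      simp at hl hc
      simpa [hc, hl] using hlx
    | cons b t' =>
      rw [List.isChain_cons_cons] at hch
      have hlt : (b :: t').getLast? = some l := by
        simpa [List.getLast?_cons_cons] using hl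
      have hall := ih hch.2 l hlt hlx
      cases hc with
      | head => exact hch.1 (hall b List.mem_cons_self)
      | tail _ h => exact hall c h

-- ===== VERDICT (by name: the statement is the Claim_ definition above) =====
theorem cadena_spec : Claim_equal_cadena := by
  intro x y _ hpre
  unfold Spec_cadena cadena cadena_alt
  by_cases hx : x = ""
  · subst hx
    rw [if_pos rfl, show ("" : String).toList = [] from rfl, cadenaGo]
    rfl
  · have hxl : x.toList ≠ [] := by
      intro h
      exact hx (by rw [← String.ofList_toList (s := x), h])
    rw [if_neg hx]
    by_cases hall : ∀ c ∈ y.toList, c ∈ x.toList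
    · have hany : y.toList.any (fun c => !(x.toList.contains c)) = false := by
        simp only [List.any_eq_false, Bool.not_eq_true']
        intro c hc
        simpa using hall c hc
      rw [hany, if_neg (by simp)]
      rw [cadenaGo_all_mem x.toList hxl y.toList hall]
      rfl
    · have hany : y.toList.any (fun c => !(x.toList.contains c)) = true := by
        push_neg at hall
        obtain ⟨c, hc, hcn⟩ := hall
        exact List.any_eq_true.mpr ⟨c, hc, by simpa using hcn⟩
      rw [hany, if_pos rfl]
      have hch : List.IsChain (fun a b => b ∈ x.toList → a ∈ x.toList) y.toList := by
        cases hpre with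
        | inl h => exact absurd h hx
        | inr h => exact h
      have hyne : y.toList ≠ [] := by
        intro h
        push_neg at hall
        obtain ⟨c, hc, _⟩ := hall
        rw [h] at hc; cases hc
      obtain ⟨l, hl⟩ := List.getLast?_isSome.mpr hyne |> Option.isSome_iff_exists.mp
      have hln : l ∉ x.toList := by
        intro hlx
        exact hall (isChain_all_mem x.toList y.toList hch l hl hlx)
      rw [cadenaGo_not_mem x.toList y.toList l hl x.toList hln]
      rfl

theorem cadena_raises : Claim_raises_cadena := by
  unfold Claim_raises_cadena
  constructor
  · intro x y _ hr hp
    cases hp with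
    | inl h => exact hr.1 h
    | inr h => exact hr.2 h
  · exact ⟨by decide, by decide, by decide⟩

-- self-check (uses cadena_raises): the raise witness itself lies outside Pre_cadena
theorem cadena_raises_witness_ok :
    ¬ Pre_cadena (pvRaiseWitness_cadena.1) (pvRaiseWitness_cadena.2) :=
  cadena_raises.1 _ _ (by decide) (by decide)
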